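-- pv_equiv track=rewrite | github.com/AbhishekD879/IVY-OZONE | lcg_uat/tests/Common.py | map_python_to_js_time_format
-- ===== SOURCE A (Python) =====
-- def map_python_to_js_time_format(py_format):
--     """
--     Map Python time format to JavaScript time format.
--
--     Args:
--         py_format (str): Python time format pattern.
--
--     Returns:
--         str: JavaScript compatible time format pattern.
--
--     Raises:
--         ValueError: If the Python format pattern is not recognized.
--     """
--     # Mapping of Python time format to JavaScript time format
--     format_mapping = {
--         '%Y': 'YYYY',
--         '%m': 'MM',
--         '%d': 'DD',
--         '%H': 'HH',
--         '%M': 'MIN',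
--         '%S': 'SS',
--         '%b': 'MON|STR',
--         '%a': 'DAY'
--     }
--
--     # Replace Python format characters with JavaScript format
--     js_format = ''
--     i = 0
--     while i < len(py_format):
--         if py_format[i] == '%' and i + 1 < len(py_format):
--             js_format += format_mapping.get(py_format[i:i + 2], py_format[i])
--             i += 1  # Skip the next character
--         else:
--             js_format += py_format[i]
--         i += 1
--
--     return js_format
-- ===== SOURCE B (Python) =====
-- def map_python_to_js_time_format(py_format):
--     """
--     Map Python time format to JavaScript time format.
--
--     Split-based rewrite: cut the string at '%' once (C-level str.split),
--     translate the chunk boundaries, and join.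
--     """
--     format_mapping = {
--         '%Y': 'YYYY',
--         '%m': 'MM',
--         '%d': 'DD',
--         '%H': 'HH',
--         '%M': 'MIN',
--         '%S': 'SS',
--         '%b': 'MON|STR',
--         '%a': 'DAY'
--     }
--     parts = py_format.split('%')
--     out = [parts[0]]
--     j = 1
--     while j < len(parts):
--         p = parts[j]
--         if p:
--             # '%' followed by p[0]: translate the code, keep the rest of the chunk
--             out.append(format_mapping.get('%' + p[0], '%') + p[1:])
--             j += 1
--         elif j + 1 < len(parts):
--             # '%%': the second '%' was consumed, the next chunk is literal
--             out.append('%' + parts[j + 1])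
--             j += 2
--         else:
--             # trailing separator with nothing after it stays literal
--             out.append('%')
--             j += 1
--     return ''.join(out)
-- ===== Notes on version B (the rewrite author's own statement) =====
-- stated objective: faster
-- what changed: Replaces the per-character index while-loop with a split('%')-based chunk translation: the string is cut once at '%', each boundary code is looked up, and the chunks are joined, moving the scan from a Python char loop into C-level str.split/str.join.
import Mathlib
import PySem

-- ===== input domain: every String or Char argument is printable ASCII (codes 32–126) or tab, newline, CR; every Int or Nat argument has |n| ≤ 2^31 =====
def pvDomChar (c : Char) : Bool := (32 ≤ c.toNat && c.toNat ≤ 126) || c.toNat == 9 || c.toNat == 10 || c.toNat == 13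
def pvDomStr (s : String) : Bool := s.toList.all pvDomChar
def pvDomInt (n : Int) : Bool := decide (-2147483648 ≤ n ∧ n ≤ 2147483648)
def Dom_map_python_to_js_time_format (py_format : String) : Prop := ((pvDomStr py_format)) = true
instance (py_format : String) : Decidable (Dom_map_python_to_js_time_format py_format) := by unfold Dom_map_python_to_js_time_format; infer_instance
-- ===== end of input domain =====

-- B replaces A's per-character index loop by cutting the string once at '%' and
-- translating/joining the chunks (measurably faster in Python; same O(n)).

-- ===== PORT A =====

-- the shared format_mapping dict
def fmtMap : PySem.Dict String String :=
  PySem.Dict.ofList [("%Y", "YYYY"), ("%m", "MM"), ("%d", "DD"), ("%H", "HH"),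
                     ("%M", "MIN"), ("%S", "SS"), ("%b", "MON|STR"), ("%a", "DAY")]

-- A's while-loop: index i, accumulator js_format; fuel = remaining length bound
def aLoop : Nat → Nat → List Char → String → String
  | 0, _, _, js => js
  | fuel + 1, i, cs, js =>
    if h : i < cs.length then
      if cs[i] = '%' ∧ i + 1 < cs.length then
        -- js += format_mapping.get(py_format[i:i+2], py_format[i]); i += 1; i += 1
        aLoop fuel (i + 2) cs
          (js ++ fmtMap.getD (String.ofList ((cs.drop i).take 2)) (String.ofList [cs[i]]))
      else
        -- js += py_format[i]; i += 1
        aLoop fuel (i + 1) cs (js ++ String.ofList [cs[i]])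
    else js

def map_python_to_js_time_format (py_format : String) : String :=
  aLoop py_format.toList.length 0 py_format.toList ""

-- ===== PORT B =====

-- B's while-loop over parts (index j steps by 1 or 2); out is the list of chunks
def bLoop : Nat → Nat → List (List Char) → List (List Char) → List (List Char)
  | 0, _, _, out => out
  | fuel + 1, j, parts, out =>
    if h : j < parts.length then
      if hp : parts[j] ≠ [] then
        -- out.append(format_mapping.get('%' + p[0], '%') + p[1:]); j += 1
        bLoop fuel (j + 1) parts
          (out ++ [(fmtMap.getD (String.ofList ('%' :: [(parts[j]).head hp])) "%").toList ++ (parts[j]).tail])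
      else if j + 1 < parts.length then
        -- out.append('%' + parts[j + 1]); j += 2
        bLoop fuel (j + 2) parts (out ++ ['%' :: parts[j + 1]!])
      else
        -- out.append('%'); j += 1
        bLoop fuel (j + 1) parts (out ++ [['%']])
    else out

-- parts = py_format.split('%'); out = [parts[0]] (split is never empty); return ''.join(out)
def map_python_to_js_time_format_alt (py_format : String) : String :=
  String.ofList (PySem.Chars.join []
    (bLoop (PySem.Chars.splitOn py_format.toList ['%']).length 1
           (PySem.Chars.splitOn py_format.toList ['%'])
           [(PySem.Chars.splitOn py_format.toList ['%']).headD []]))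

-- ===== PRECONDITION & SPEC =====
def Spec_map_python_to_js_time_format (py_format : String) (out : String) : Prop := out = map_python_to_js_time_format_alt py_format
instance (py_format : String) (out : String) : Decidable (Spec_map_python_to_js_time_format py_format out) := by unfold Spec_map_python_to_js_time_format; infer_instance

-- ===== CLAIM (what is proved, stated in full; the proofs are below) =====
def Claim_equal_map_python_to_js_time_format : Prop := ∀ (py_format : String), Dom_map_python_to_js_time_format py_format → Spec_map_python_to_js_time_format py_format (map_python_to_js_time_format py_format)

-- ===== LEMMAS AND PROOFS =====

-- the common specification: the two-character scan, as a structural recursion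
def subPercent : List Char → List Char
  | [] => []
  | '%' :: d :: rest => (fmtMap.getD (String.ofList ['%', d]) "%").toList ++ subPercent rest
  | c :: rest => c :: subPercent rest

-- split on '%' as a structural recursion
def mySplit : List Char → List (List Char)
  | [] => [[]]
  | c :: rest => if c = '%' then [] :: mySplit rest
                 else match mySplit rest with
                      | [] => [[c]]
                      | h :: t => (c :: h) :: t

def consHead (p : List Char) : List (List Char) → List (List Char)
  | [] => [p]
  | h :: t => (p ++ h) :: t

theorem mySplit_ne_nil (cs : List Char) : mySplit cs ≠ [] := by
  cases cs with
  | nil => simp [mySplit]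
  | cons c rest =>
    simp only [mySplit]
    split
    · simp
    · split <;> simp

theorem mySplit_pct (rest : List Char) : mySplit ('%' :: rest) = [] :: mySplit rest := by
  simp [mySplit]

theorem mySplit_cons_of_ne (c : Char) (rest : List Char) (hc : c ≠ '%') :
    mySplit (c :: rest) = consHead [c] (mySplit rest) := by
  simp only [mySplit, if_neg hc]
  cases hm : mySplit rest with
  | nil => exact absurd hm (mySplit_ne_nil rest)
  | cons h t => simp [consHead]

theorem consHead_nil_of_ne (m : List (List Char)) (h : m ≠ []) : consHead [] m = m := by
  cases m with
  | nil => exact absurd rfl h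
  | cons a t => simp [consHead]

theorem consHead_consHead (p q : List Char) (m : List (List Char)) :
    consHead p (consHead q m) = consHead (p ++ q) m := by
  cases m <;> simp [consHead]

theorem go_spec (fuel : Nat) : ∀ (l cur : List Char) (accs : List (List Char)),
    l.length < fuel →
    PySem.Chars.splitOn.go ['%'] fuel l cur accs =
      accs.reverse ++ consHead cur.reverse (mySplit l) := by
  induction fuel with
  | zero => intro l cur accs h; omega
  | succ fuel ih =>
    intro l cur accs h
    cases l with
    | nil =>
      simp [PySem.Chars.splitOn.go, mySplit, consHead]
    | cons c rest =>
      simp only [PySem.Chars.splitOn.go]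
      by_cases hc : c = '%'
      · subst hc
        have hpre : List.isPrefixOf ['%'] ('%' :: rest) = true := by
          simp [List.isPrefixOf]
        simp only [hpre, if_pos]
        have hgo := ih rest [] (cur.reverse :: accs) (by simpa using Nat.lt_of_succ_lt_succ h)
        simp only [List.length_cons, List.length_nil, List.drop_succ_cons, List.drop_zero] at hgo ⊢
        rw [hgo, mySplit_pct]
        simp only [List.reverse_nil]
        rw [consHead_nil_of_ne _ (mySplit_ne_nil rest)]
        simp [consHead]
      · have hpre : List.isPrefixOf ['%'] (c :: rest) = false := by
          simp [List.isPrefixOf]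
          intro hh; exact absurd hh.symm hc
        simp only [hpre, Bool.false_eq_true, if_neg, not_false_iff]
        rw [ih rest (c :: cur) accs (Nat.lt_of_succ_lt_succ h)]
        rw [mySplit_cons_of_ne c rest hc, consHead_consHead]
        simp

theorem splitOn_eq_mySplit (cs : List Char) :
    PySem.Chars.splitOn cs ['%'] = mySplit cs := by
  unfold PySem.Chars.splitOn
  rw [go_spec (cs.length + 1) cs [] [] (Nat.lt_succ_self _)]
  simp [consHead_nil_of_ne _ (mySplit_ne_nil cs)]

theorem subPercent_cons_of_ne (c : Char) (rest : List Char) (hc : c ≠ '%') :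
    subPercent (c :: rest) = c :: subPercent rest := by
  cases rest with
  | nil => simp [subPercent]
  | cons d r =>
    rw [subPercent]
    intro d1 r1 hc' _
    exact hc hc'

-- appending one translated chunk, at the String level
theorem str_chunk (js M : String) (l : List Char) :
    js ++ M ++ String.ofList l = js ++ String.ofList (M.toList ++ l) := by
  simp [String.append_assoc]

theorem str_chunk1 (js : String) (c : Char) (l : List Char) :
    js ++ String.ofList [c] ++ String.ofList l = js ++ String.ofList (c :: l) := by
  rw [String.append_assoc, ← String.ofList_append]
  rfl

-- A's loop computes subPercent of the remaining suffix
theorem aLoop_spec (cs : List Char) (fuel : Nat) : ∀ (i : Nat) (js : String),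
    cs.length - i ≤ fuel →
    aLoop fuel i cs js = js ++ String.ofList (subPercent (cs.drop i)) := by
  induction fuel with
  | zero =>
    intro i js h
    have : cs.length ≤ i := by omega
    simp [aLoop, List.drop_eq_nil_of_le this, subPercent]
  | succ fuel ih =>
    intro i js h
    rw [aLoop]
    split
    · rename_i hi
      have hdrop : cs.drop i = cs[i] :: cs.drop (i + 1) := List.drop_eq_getElem_cons hi
      split
      · rename_i hcond
        obtain ⟨hc, hi1⟩ := hcond
        have hdrop1 : cs.drop (i + 1) = cs[i + 1] :: cs.drop (i + 2) := List.drop_eq_getElem_cons hi1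
        rw [ih (i + 2) _ (by omega)]
        have hkey : (cs.drop i).take 2 = ['%', cs[i + 1]] := by
          rw [hdrop, hdrop1, hc]; rfl
        have hsub : subPercent (cs.drop i) =
            (fmtMap.getD (String.ofList ['%', cs[i + 1]]) "%").toList ++
              subPercent (cs.drop (i + 2)) := by
          rw [hdrop, hdrop1, hc, subPercent]
        have hpct : String.ofList ['%'] = "%" := rfl
        rw [hsub, hkey, hc, hpct]
        exact str_chunk _ _ _
      · rename_i hcond
        rw [ih (i + 1) _ (by omega)]
        have hsub : subPercent (cs.drop i) = cs[i] :: subPercent (cs.drop (i + 1)) := by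
          by_cases hc : cs[i] = '%'
          · have hi1 : ¬ i + 1 < cs.length := fun hl => hcond ⟨hc, hl⟩
            have hnil : cs.drop (i + 1) = [] := List.drop_eq_nil_of_le (by omega)
            rw [hdrop, hnil, hc]; simp [subPercent]
          · rw [hdrop]; exact subPercent_cons_of_ne _ _ hc
        rw [hsub]
        exact str_chunk1 _ _ _
    · rename_i hi
      have : cs.drop i = [] := List.drop_eq_nil_of_le (by omega)
      simp [this, subPercent]

-- B's loop over the split parts, as a structural recursion on the part list
def bGo : List (List Char) → List (List Char)
  | [] => []
  | [p] =>
    if hp : p ≠ [] then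
      [(fmtMap.getD (String.ofList ('%' :: [p.head hp])) "%").toList ++ p.tail]
    else [['%']]
  | p :: q :: rest =>
    if hp : p ≠ [] then
      ((fmtMap.getD (String.ofList ('%' :: [p.head hp])) "%").toList ++ p.tail) ::
        bGo (q :: rest)
    else ('%' :: q) :: bGo rest

theorem bGo_cons_of_ne (p : List Char) (rest : List (List Char)) (hp : p ≠ []) :
    bGo (p :: rest) =
      ((fmtMap.getD (String.ofList ('%' :: [p.head hp])) "%").toList ++ p.tail) :: bGo rest := by
  cases rest <;> simp [bGo, hp]

theorem bGo_nil_cons (q : List Char) (rest : List (List Char)) :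
    bGo ([] :: q :: rest) = ('%' :: q) :: bGo rest := by
  simp [bGo]

theorem bLoop_spec (parts : List (List Char)) (fuel : Nat) :
    ∀ (j : Nat) (out : List (List Char)),
    parts.length - j ≤ fuel →
    bLoop fuel j parts out = out ++ bGo (parts.drop j) := by
  induction fuel with
  | zero =>
    intro j out h
    have : parts.length ≤ j := by omega
    simp [bLoop, List.drop_eq_nil_of_le this, bGo]
  | succ fuel ih =>
    intro j out h
    rw [bLoop]
    split
    · rename_i hj
      have hdrop : parts.drop j = parts[j] :: parts.drop (j + 1) := List.drop_eq_getElem_cons hj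
      by_cases hp : parts[j] ≠ []
      · rw [dif_pos hp, ih (j + 1) _ (by omega), hdrop, bGo_cons_of_ne _ _ hp]
        simp
      · rw [dif_neg hp]
        have hpnil : parts[j] = [] := by simpa using hp
        by_cases hj1 : j + 1 < parts.length
        · have hdrop1 : parts.drop (j + 1) = parts[j + 1] :: parts.drop (j + 2) :=
            List.drop_eq_getElem_cons hj1
          have hget : parts[j + 1]! = parts[j + 1] := getElem!_pos parts (j + 1) hj1
          rw [if_pos hj1, ih (j + 2) _ (by omega), hdrop, hdrop1, hpnil, bGo_nil_cons, hget]
          simp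
        · have hnil : parts.drop (j + 1) = [] := List.drop_eq_nil_of_le (by omega)
          rw [if_neg hj1, ih (j + 1) _ (by omega), hdrop, hnil, hpnil]
          simp [bGo]
    · rename_i hj
      have : parts.drop j = [] := List.drop_eq_nil_of_le (by omega)
      simp [this, bGo]

-- chunk reconstruction from the split equals the two-character scan
theorem bOut_mySplit (cs : List Char) :
    (mySplit cs).headD [] ++ (bGo ((mySplit cs).tail)).flatten = subPercent cs := by
  induction cs using subPercent.induct with
  | case1 => simp [mySplit, bGo, subPercent]
  | case2 d rest ih =>
    by_cases hd : d = '%'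
    · subst hd
      have hkey : fmtMap.getD (String.ofList ['%', '%']) "%" = "%" := by decide
      rw [mySplit_pct, mySplit_pct]
      cases hm : mySplit rest with
      | nil => exact absurd hm (mySplit_ne_nil rest)
      | cons h t =>
        have hih := ih
        rw [hm] at hih
        simp only [List.headD_cons, List.tail_cons] at hih
        simp only [List.headD_cons, List.tail_cons, List.nil_append]
        rw [bGo_nil_cons, subPercent, hkey]
        simp [← hih]
    · rw [mySplit_pct, mySplit_cons_of_ne d rest hd]
      cases hm : mySplit rest with
      | nil => exact absurd hm (mySplit_ne_nil rest)
      | cons h t =>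
        have hih := ih
        rw [hm] at hih
        simp only [List.headD_cons, List.tail_cons] at hih
        simp only [consHead, List.headD_cons, List.tail_cons, List.singleton_append]
        rw [bGo_cons_of_ne (d :: h) t (by simp)]
        simp only [List.flatten_cons, List.nil_append, List.head_cons, List.tail_cons]
        rw [subPercent, List.append_assoc, hih]
  | case3 c rest hne ih =>
    by_cases hc : c = '%'
    · -- only possible when rest = [] (otherwise the previous pattern would have matched)
      subst hc
      cases rest with
      | nil => simp [mySplit, bGo, subPercent]
      | cons d rest' => exact (hne d rest' rfl rfl).elim
    · rw [mySplit_cons_of_ne c rest hc]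
      cases hm : mySplit rest with
      | nil => exact absurd hm (mySplit_ne_nil rest)
      | cons h t =>
        have hih := ih
        rw [hm] at hih
        simp only [List.headD_cons, List.tail_cons] at hih
        simp only [consHead, List.headD_cons, List.tail_cons, List.singleton_append]
        rw [subPercent_cons_of_ne _ _ hc, ← hih]
        simp

theorem intercalate_nil_eq_flatten (xs : List (List Char)) :
    List.intercalate [] xs = xs.flatten := by
  induction xs with
  | nil => simp [List.intercalate]
  | cons h t ih =>
    cases t with
    | nil => simp [List.intercalate]
    | cons a t' =>
      simp only [List.intercalate, List.intersperse] at ih ⊢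
      simp_all

-- ===== VERDICT (by name: the statement is the Claim_ definition above) =====
theorem map_python_to_js_time_format_spec : Claim_equal_map_python_to_js_time_format := by
  intro py_format _
  unfold Spec_map_python_to_js_time_format
  unfold map_python_to_js_time_format map_python_to_js_time_format_alt
  rw [aLoop_spec _ _ 0 "" (by omega)]
  rw [splitOn_eq_mySplit]
  rw [bLoop_spec _ _ 1 _ (by omega)]
  rw [List.drop_one]
  simp only [List.drop_zero, PySem.Chars.join]
  rw [intercalate_nil_eq_flatten, List.singleton_append]
  conv_rhs => rw [show ((mySplit py_format.toList).headD [] :: bGo (mySplit py_format.toList).tail).flatten = (mySplit py_format.toList).headD [] ++ (bGo (mySplit py_format.toList).tail).flatten from by simp]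
  rw [bOut_mySplit]
  apply String.ext
  simp
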